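-- pv_equiv track=rewrite | github.com/ZXCLF/Pi | main.py | compute_pi_terms
-- ===== SOURCE A (Python) =====
-- import math
--
-- def compute_pi_terms(start, end):
--     """计算Chudnovsky级数的指定范围内的项（分数形式）"""
--     C = 640320**3  # 常数C，避免重复计算
--     total_num = 0
--     total_den = 1
--
--     for k in range(start, end + 1):
--         # 计算分子
--         sign = 1 if k % 2 == 0 else -1
--         numerator = sign * math.factorial(6 * k) * (545140134 * k + 13591409)
--
--         # 计算分母
--         denominator = math.factorial(3 * k) * (math.factorial(k))**3 * (C**k)
--
--         # 将当前项加到总和中（通分）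
--         if numerator != 0:
--             # 通分公式: a/b + c/d = (a*d + b*c) / (b*d)
--             new_num = total_num * denominator + numerator * total_den
--             new_den = total_den * denominator
--             # 约分
--             gcd_val = math.gcd(new_num, new_den)
--             if gcd_val != 0:
--                 total_num = new_num // gcd_val
--                 total_den = new_den // gcd_val
--             else:
--                 total_num, total_den = new_num, new_den
--         else:
--             # 当前项为0，跳过
--             continue
--
--     return total_num, total_den
-- ===== SOURCE B (Python) =====
-- import math
--
-- def compute_pi_terms(start, end):
--     """Same exact reduced-fraction sum, but factorials and C**k are carried
--     incrementally across iterations instead of recomputed per term."""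
--     C = 640320**3
--     total_num = 0
--     total_den = 1
--     if start > end:
--         return total_num, total_den
--     k = start
--     f6 = math.factorial(6 * k)      # (6k)!
--     f3 = math.factorial(3 * k)      # (3k)!
--     fk = math.factorial(k)          # k!
--     ck = C**k                       # C^k
--     while k <= end:
--         sign = 1 if k % 2 == 0 else -1
--         numerator = sign * f6 * (545140134 * k + 13591409)
--         denominator = f3 * fk**3 * ck
--         new_num = total_num * denominator + numerator * total_den
--         new_den = total_den * denominator
--         g = math.gcd(new_num, new_den)
--         total_num = new_num // g
--         total_den = new_den // g
--         # advance incremental state to k+1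
--         f6 *= (6*k+1)*(6*k+2)*(6*k+3)*(6*k+4)*(6*k+5)*(6*k+6)
--         f3 *= (3*k+1)*(3*k+2)*(3*k+3)
--         fk *= (k+1)
--         ck *= C
--         k += 1
--     return total_num, total_den
-- ===== Notes on version B (the rewrite author's own statement) =====
-- stated objective: alternative
-- what changed: B replaces the per-term recomputation of factorial(6k), factorial(3k), factorial(k) and C**k by running products carried across iterations and updated with O(1) multiplications per step (and drops the dead numerator!=0 / gcd!=0 guards, which never fire for k>=0).
import Mathlib
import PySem

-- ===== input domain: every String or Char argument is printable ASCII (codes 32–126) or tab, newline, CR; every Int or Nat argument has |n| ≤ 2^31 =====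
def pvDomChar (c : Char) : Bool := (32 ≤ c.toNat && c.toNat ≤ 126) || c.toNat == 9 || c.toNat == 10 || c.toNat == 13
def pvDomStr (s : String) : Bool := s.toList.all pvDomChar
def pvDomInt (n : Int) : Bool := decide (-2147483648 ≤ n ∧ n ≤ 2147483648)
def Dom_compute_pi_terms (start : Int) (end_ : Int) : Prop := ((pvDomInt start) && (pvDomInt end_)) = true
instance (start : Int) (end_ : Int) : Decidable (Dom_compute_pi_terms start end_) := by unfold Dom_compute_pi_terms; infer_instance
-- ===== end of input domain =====

-- One honest line: B keeps (6k)!, (3k)!, k! and C^k as running products updated per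
-- iteration instead of recomputing each factorial and power from scratch (objective:
-- alternative; the per-step gcd dominates, so no measured speedup).
-- The Python functions return a 2-tuple (num, den); per the task signature it is ported as the list [num, den].

-- ===== PORT A =====
-- math.factorial(n) for n ≥ 0 (Python raises for n < 0; such inputs are outside Pre_)
def pvFact (n : Int) : Int := (Nat.factorial n.toNat : Int)

def piStepA (st : Int × Int) (k : Int) : Int × Int :=
  let sign : Int := if PySem.Int.mod k 2 = 0 then 1 else -1
  let numerator := sign * pvFact (6 * k) * (545140134 * k + 13591409)
  let denominator := pvFact (3 * k) * (pvFact k) ^ 3 * ((640320:Int) ^ 3) ^ k.toNat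
  if numerator ≠ 0 then
    let new_num := st.1 * denominator + numerator * st.2
    let new_den := st.2 * denominator
    let g : Int := Int.gcd new_num new_den
    if g ≠ 0 then (PySem.Int.floordiv new_num g, PySem.Int.floordiv new_den g)
    else (new_num, new_den)
  else st

def compute_pi_terms (start : Int) (end_ : Int) : List Int :=
  let r := (PySem.List.pyRange start (end_ + 1) 1).foldl piStepA (0, 1)
  [r.1, r.2]

-- ===== PORT B =====
-- the while-loop of Source B; fuel n = number of remaining iterations (k ≤ end)
def piLoopB : Nat → Int → Int → Int → Int → Int → Int → Int → Int × Int
  | 0, _, _, _, _, _, num, den => (num, den)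
  | n + 1, k, f6, f3, fk, ck, num, den =>
    let sign : Int := if PySem.Int.mod k 2 = 0 then 1 else -1
    let numerator := sign * f6 * (545140134 * k + 13591409)
    let denominator := f3 * fk ^ 3 * ck
    let new_num := num * denominator + numerator * den
    let new_den := den * denominator
    let g : Int := Int.gcd new_num new_den
    piLoopB n (k + 1)
      (f6 * ((6*k+1) * (6*k+2) * (6*k+3) * (6*k+4) * (6*k+5) * (6*k+6)))
      (f3 * ((3*k+1) * (3*k+2) * (3*k+3)))
      (fk * (k + 1))
      (ck * 640320 ^ 3)
      (PySem.Int.floordiv new_num g) (PySem.Int.floordiv new_den g)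

def compute_pi_terms_alt (start : Int) (end_ : Int) : List Int :=
  if end_ < start then [0, 1]
  else
    let r := piLoopB (end_ + 1 - start).toNat start
      (pvFact (6 * start)) (pvFact (3 * start)) (pvFact start)
      (((640320:Int) ^ 3) ^ start.toNat) 0 1
    [r.1, r.2]

-- ===== PRECONDITION & SPEC =====
-- Pre_ excludes exactly the inputs where Python A raises: a nonempty range containing a
-- negative k makes math.factorial raise ValueError (and C**k yield a float). B raises there too.
def Pre_compute_pi_terms (start : Int) (end_ : Int) : Prop := 0 ≤ start ∨ end_ < start
instance (start : Int) (end_ : Int) : Decidable (Pre_compute_pi_terms start end_) := by unfold Pre_compute_pi_terms; infer_instance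
def pvWitness_compute_pi_terms : Int × Int := (0, 2)

def Spec_compute_pi_terms (start : Int) (end_ : Int) (out : List Int) : Prop := out = compute_pi_terms_alt start end_
instance (start : Int) (end_ : Int) (out : List Int) : Decidable (Spec_compute_pi_terms start end_ out) := by unfold Spec_compute_pi_terms; infer_instance

-- ===== CLAIM (what is proved, stated in full; the proofs are below) =====
def Claim_equal_compute_pi_terms : Prop := ∀ (start : Int) (end_ : Int), Dom_compute_pi_terms start end_ → Pre_compute_pi_terms start end_ → Spec_compute_pi_terms start end_ (compute_pi_terms start end_)

-- ===== LEMMAS AND PROOFS =====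

lemma pvFact_pos (n : Int) : 0 < pvFact n := by
  unfold pvFact; exact_mod_cast Nat.factorial_pos _

lemma pvFact_succ (m : Int) (h : 0 ≤ m) : pvFact (m + 1) = pvFact m * (m + 1) := by
  unfold pvFact
  rw [show (m + 1).toNat = m.toNat + 1 by omega, Nat.factorial_succ]
  push_cast [Int.toNat_of_nonneg h]
  ring

lemma floordiv_gcd_den_ne_zero (a b : Int) (hb : b ≠ 0) :
    PySem.Int.floordiv b (Int.gcd a b) ≠ 0 := by
  have hg : (0 : Int) < Int.gcd a b := by
    have h0 : Int.gcd a b ≠ 0 := by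
      intro h0
      exact hb (Int.gcd_eq_zero_iff.mp h0).2
    omega
  obtain ⟨q, hq⟩ : (Int.gcd a b : Int) ∣ b := Int.gcd_dvd_right a b
  rw [PySem.Int.floordiv_eq_ediv_of_pos hg]
  nth_rewrite 1 [hq]
  rw [Int.mul_ediv_cancel_left _ (by omega)]
  intro h0
  apply hb
  rw [hq, h0, mul_zero]

lemma numerator_ne_zero (k : Int) (hk : 0 ≤ k) :
    (if PySem.Int.mod k 2 = 0 then (1:Int) else -1) * pvFact (6 * k) * (545140134 * k + 13591409) ≠ 0 := by
  have h1 : (0:Int) < pvFact (6 * k) := pvFact_pos _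
  have h2 : (0:Int) < 545140134 * k + 13591409 := by omega
  split_ifs <;> intro h <;> nlinarith

lemma loop_eq (n : Nat) : ∀ (k num den : Int), 0 ≤ k → den ≠ 0 →
    (PySem.List.pyRange k (k + (n : Int)) 1).foldl piStepA (num, den)
      = piLoopB n k (pvFact (6 * k)) (pvFact (3 * k)) (pvFact k)
          (((640320:Int) ^ 3) ^ k.toNat) num den := by
  induction n with
  | zero =>
    intro k num den _ _
    simp [piLoopB]
  | succ n ih =>
    intro k num den hk hden
    have hlt : k < k + ((n : Nat) + 1 : Nat) := by push_cast; omega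
    rw [PySem.List.pyRange_one_cons hlt, List.foldl_cons]
    have hnum := numerator_ne_zero k hk
    have hdpos : (0:Int) < pvFact (3*k) * (pvFact k)^3 * ((640320:Int)^3) ^ k.toNat := by
      have h1 := pvFact_pos (3*k); have h2 := pvFact_pos k
      positivity
    have hnd : den * (pvFact (3*k) * (pvFact k)^3 * ((640320:Int)^3) ^ k.toNat) ≠ 0 :=
      mul_ne_zero hden (by omega)
    have hg : (Int.gcd
        (num * (pvFact (3*k) * (pvFact k)^3 * ((640320:Int)^3) ^ k.toNat) +
          ((if PySem.Int.mod k 2 = 0 then (1:Int) else -1) * pvFact (6*k) * (545140134*k + 13591409)) * den)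
        (den * (pvFact (3*k) * (pvFact k)^3 * ((640320:Int)^3) ^ k.toNat)) : Int) ≠ 0 := by
      intro h0
      exact hnd (Int.gcd_eq_zero_iff.mp (by exact_mod_cast h0)).2
    have hstep : piStepA (num, den) k =
        (PySem.Int.floordiv
            (num * (pvFact (3*k) * (pvFact k)^3 * ((640320:Int)^3) ^ k.toNat) +
              ((if PySem.Int.mod k 2 = 0 then (1:Int) else -1) * pvFact (6*k) * (545140134*k + 13591409)) * den)
            (Int.gcd
              (num * (pvFact (3*k) * (pvFact k)^3 * ((640320:Int)^3) ^ k.toNat) +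
                ((if PySem.Int.mod k 2 = 0 then (1:Int) else -1) * pvFact (6*k) * (545140134*k + 13591409)) * den)
              (den * (pvFact (3*k) * (pvFact k)^3 * ((640320:Int)^3) ^ k.toNat))),
          PySem.Int.floordiv
            (den * (pvFact (3*k) * (pvFact k)^3 * ((640320:Int)^3) ^ k.toNat))
            (Int.gcd
              (num * (pvFact (3*k) * (pvFact k)^3 * ((640320:Int)^3) ^ k.toNat) +
                ((if PySem.Int.mod k 2 = 0 then (1:Int) else -1) * pvFact (6*k) * (545140134*k + 13591409)) * den)
              (den * (pvFact (3*k) * (pvFact k)^3 * ((640320:Int)^3) ^ k.toNat)))) := by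
      simp only [piStepA]
      rw [if_pos hnum, if_pos hg]
    have h6 : pvFact (6 * (k + 1)) = pvFact (6*k) * ((6*k+1)*(6*k+2)*(6*k+3)*(6*k+4)*(6*k+5)*(6*k+6)) := by
      have e : 6 * (k + 1) = 6*k+1+1+1+1+1+1 := by ring
      rw [e, pvFact_succ _ (by omega), pvFact_succ _ (by omega), pvFact_succ _ (by omega),
        pvFact_succ _ (by omega), pvFact_succ _ (by omega), pvFact_succ _ (by omega)]
      ring
    have h3 : pvFact (3 * (k + 1)) = pvFact (3*k) * ((3*k+1)*(3*k+2)*(3*k+3)) := by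
      have e : 3 * (k + 1) = 3*k+1+1+1 := by ring
      rw [e, pvFact_succ _ (by omega), pvFact_succ _ (by omega), pvFact_succ _ (by omega)]
      ring
    have h1 : pvFact (k + 1) = pvFact k * (k + 1) := pvFact_succ _ hk
    have hc : ((640320:Int)^3) ^ (k+1).toNat = ((640320:Int)^3) ^ k.toNat * 640320 ^ 3 := by
      rw [show (k+1).toNat = k.toNat + 1 by omega, pow_succ]
    have hrange : k + ((n : Nat) + 1 : Nat) = (k + 1) + (n : Int) := by push_cast; ring
    rw [hstep, hrange]
    have hden' : PySem.Int.floordiv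
        (den * (pvFact (3*k) * (pvFact k)^3 * ((640320:Int)^3) ^ k.toNat))
        (Int.gcd
          (num * (pvFact (3*k) * (pvFact k)^3 * ((640320:Int)^3) ^ k.toNat) +
            ((if PySem.Int.mod k 2 = 0 then (1:Int) else -1) * pvFact (6*k) * (545140134*k + 13591409)) * den)
          (den * (pvFact (3*k) * (pvFact k)^3 * ((640320:Int)^3) ^ k.toNat))) ≠ 0 :=
      floordiv_gcd_den_ne_zero _ _ hnd
    rw [ih (k + 1) _ _ (by omega) hden']
    simp only [piLoopB, h6, h3, h1, hc]

-- ===== VERDICT (by name: the statement is the Claim_ definition above) =====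
theorem compute_pi_terms_spec : Claim_equal_compute_pi_terms := by
  intro start end_ _ hpre
  unfold Spec_compute_pi_terms
  simp only [compute_pi_terms, compute_pi_terms_alt]
  by_cases h : end_ < start
  · rw [if_pos h]
    rw [PySem.List.pyRange_one]
    simp [show (end_ + 1 - start).toNat = 0 by omega]
  · rw [if_neg h]
    have hs : 0 ≤ start := by
      rcases hpre with h' | h'
      · exact h'
      · omega
    have hiter := loop_eq (end_ + 1 - start).toNat start 0 1 hs one_ne_zero
    rw [show start + (((end_ + 1 - start).toNat : Nat) : Int) = end_ + 1 by omega] at hiter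
    rw [hiter]
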